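-- pv_equiv track=rewrite | github.com/42ibaran/gomoku_v2 | small_patterns.py | get_small_patterns
-- ===== SOURCE A (Python) =====
-- PATTERN_SIZES = [19] * 38 + \
--     (list(range(1, 20, 1)) + list(range(18, 0, -1))) * 2
--
-- def get_small_patterns(patterns, mask_size):
--     small_patterns = {}
--     for pattern_index, pattern in enumerate(patterns):
--         pattern_size = PATTERN_SIZES[pattern_index]
--         while pattern != 0:
--             small_pattern = pattern % 3**mask_size
--             if small_pattern != 0:
--                 small_patterns[small_pattern] = 1 if small_pattern not in small_patterns else small_patterns[small_pattern] + 1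
--             pattern //= 3
--             pattern_size -= 1
--     return small_patterns
-- ===== SOURCE B (Python) =====
-- def get_small_patterns(patterns, mask_size):
--     counts = {}
--     for pattern in patterns:
--         # base-3 digit list, least significant first (empty for 0)
--         digits = []
--         while pattern != 0:
--             pattern, d = divmod(pattern, 3)
--             digits.append(d)
--         # each window is read off the digit array by Horner evaluation
--         for i in range(len(digits)):
--             w = 0
--             for d in reversed(digits[i:i + mask_size]):
--                 w = w * 3 + d
--             if w != 0:
--                 counts[w] = counts.get(w, 0) + 1
--     return counts
-- ===== Notes on version B (the rewrite author's own statement) =====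
-- stated objective: alternative
-- what changed: B decomposes each pattern once into an explicit base-3 digit array and reads each window off it by Horner evaluation of a slice, instead of destructively shifting the integer with repeated big-int modulo 3**mask_size and floor division; it also drops the dead PATTERN_SIZES lookup.
-- outside the precondition, e.g. on get_small_patterns([1], -1): A returns {5.551115123125783e-17: 1}, B returns {}
-- crash fix: On nonnegative patterns A raises where B returns the window counts: IndexError with more than 112 patterns (PATTERN_SIZES has 112 entries), and ZeroDivisionError when mask_size <= -679 (3**mask_size underflows to float 0.0) and some pattern is nonzero. — e.g. on get_small_patterns(([0, 0, 0, 0, 0, 0, 0, 0, 0, 0, 0, 0, 0, 0, 0, 0, 0, 0, 0, 0, 0, 0, 0, 0, 0, 0, 0, 0, 0, 0, 0, 0, 0, 0, 0, 0, 0, 0, 0, …): A raises IndexError, B returns [(2, 1), (1, 1)]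
import Mathlib
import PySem

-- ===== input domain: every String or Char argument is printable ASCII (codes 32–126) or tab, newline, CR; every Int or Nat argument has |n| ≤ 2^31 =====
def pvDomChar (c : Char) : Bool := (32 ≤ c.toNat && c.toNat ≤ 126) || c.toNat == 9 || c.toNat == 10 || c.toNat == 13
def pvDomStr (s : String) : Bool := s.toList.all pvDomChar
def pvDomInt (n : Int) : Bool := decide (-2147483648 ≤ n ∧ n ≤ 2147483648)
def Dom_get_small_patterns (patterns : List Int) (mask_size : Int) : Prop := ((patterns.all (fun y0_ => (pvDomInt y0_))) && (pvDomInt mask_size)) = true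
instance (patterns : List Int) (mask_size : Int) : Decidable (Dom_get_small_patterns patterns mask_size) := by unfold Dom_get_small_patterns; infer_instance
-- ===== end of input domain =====

-- B reads each pattern's windows off an explicit base-3 digit array by Horner evaluation of slices,
-- instead of A's destructive integer shifting with modulo/floor-division and its dead PATTERN_SIZES lookup.


-- ===== PORT A =====
-- PATTERN_SIZES = [19] * 38 + (list(range(1, 20, 1)) + list(range(18, 0, -1))) * 2
def PATTERN_SIZES : List Int :=
  List.replicate 38 (19 : Int) ++
    ((PySem.List.pyRange 1 20 1 ++ PySem.List.pyRange 18 0 (-1)) ++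
     (PySem.List.pyRange 1 20 1 ++ PySem.List.pyRange 18 0 (-1)))

-- the 'while pattern != 0' loop; fuel = pattern.toNat suffices since pattern // 3 < pattern for pattern > 0
-- (Python diverges on a negative pattern; those inputs are outside Pre_).
def pvInnerA (msize : Int) : Nat → Int → Int → PySem.Dict Int Int → PySem.Dict Int Int
  | 0, _, _, d => d
  | fuel + 1, pattern, psize, d =>
    if pattern ≠ 0 then
      let sp := PySem.Int.mod pattern ((3 : Int) ^ msize.toNat)
      let d' := if sp ≠ 0 then
          d.insert sp (if d.contains sp = false then 1 else d.getD sp 0 + 1)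
        else d
      pvInnerA msize fuel (PySem.Int.floordiv pattern 3) (psize - 1) d'
    else d

def get_small_patterns (patterns : List Int) (mask_size : Int) : List (Int × Int) :=
  ((PySem.List.enumerate patterns 0).foldl (fun d pi =>
      match PySem.List.pyGet? PATTERN_SIZES pi.1 with
      | none => d      -- Python raises IndexError here; excluded by Pre_
      | some psize => pvInnerA mask_size pi.2.toNat pi.2 psize d)
    PySem.Dict.empty).items

-- ===== PORT B =====
-- the digit-extraction 'while' loop of Source B (fuel = pattern.toNat; negative patterns are outside Pre_)
def pvDigitsB : Nat → Int → List Int → List Int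
  | 0, _, ds => ds
  | fuel + 1, p, ds =>
    if p ≠ 0 then
      pvDigitsB fuel (PySem.Int.floordiv p 3) (ds ++ [PySem.Int.mod p 3])
    else ds

-- 'w = 0; for d in reversed(chunk): w = w * 3 + d'
def pvHornerB (chunk : List Int) : Int := chunk.reverse.foldl (fun w d => w * 3 + d) 0

-- 'for i in range(len(digits)): …'
def pvWindowsB (digits : List Int) (msize : Int) (d : PySem.Dict Int Int) : PySem.Dict Int Int :=
  (PySem.List.pyRange 0 (digits.length : Int) 1).foldl (fun d i =>
    let w := pvHornerB (PySem.List.slice digits (some i) (some (i + msize)))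
    if w ≠ 0 then d.insert w (d.getD w 0 + 1) else d) d

def get_small_patterns_alt (patterns : List Int) (mask_size : Int) : List (Int × Int) :=
  (patterns.foldl (fun d pattern =>
      pvWindowsB (pvDigitsB pattern.toNat pattern []) mask_size d)
    PySem.Dict.empty).items

-- ===== PRECONDITION & SPEC =====
-- Pre_ excludes exactly the inputs where the Python A does not return an int-keyed dict: a negative
-- pattern makes the while loop diverge, more than 112 patterns raises IndexError (len(PATTERN_SIZES)=112),
-- and a negative mask_size makes 3**mask_size a float (float keys) unless no pattern is nonzero.
def Pre_get_small_patterns (patterns : List Int) (mask_size : Int) : Prop :=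
  (∀ p ∈ patterns, 0 ≤ p) ∧ patterns.length ≤ 112 ∧
    (0 ≤ mask_size ∨ ∀ p ∈ patterns, p = 0)
instance (patterns : List Int) (mask_size : Int) : Decidable (Pre_get_small_patterns patterns mask_size) := by unfold Pre_get_small_patterns; infer_instance

def pvWitness_get_small_patterns : List Int × Int := ([5, 13, 0, 81], 2)

-- On nonnegative patterns A raises where B returns: with more than 112 patterns it raises IndexError
-- reading PATTERN_SIZES (B never consults PATTERN_SIZES), and with mask_size ≤ -679 and a nonzero
-- pattern it raises ZeroDivisionError (3**mask_size underflows to float 0.0); B returns the window counts.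
def Raises_get_small_patterns (patterns : List Int) (mask_size : Int) : Prop :=
  (∀ p ∈ patterns, 0 ≤ p) ∧
    (112 < patterns.length ∨ (mask_size ≤ -679 ∧ ∃ p ∈ patterns, p ≠ 0))
instance (patterns : List Int) (mask_size : Int) : Decidable (Raises_get_small_patterns patterns mask_size) := by unfold Raises_get_small_patterns; infer_instance
def pvRaiseWitness_get_small_patterns : List Int × Int := ([0, 0, 0, 0, 0, 0, 0, 0, 0, 0, 0, 0, 0, 0, 0, 0, 0, 0, 0, 0, 0, 0, 0, 0, 0, 0, 0, 0, 0, 0, 0, 0, 0, 0, 0, 0, 0, 0, 0, 0, 0, 0, 0, 0, 0, 0, 0, 0, 0, 0, 0, 0, 0, 0, 0, 0, 0, 0, 0, 0, 0, 0, 0, 0, 0, 0, 0, 0, 0, 0, 0, 0, 0, 0, 0, 0, 0, 0, 0, 0, 0, 0, 0, 0, 0, 0, 0, 0, 0, 0, 0, 0, 0, 0, 0, 0, 0, 0, 0, 0, 0, 0, 0, 0, 0, 0, 0, 0, 0, 0, 0, 0, 5], 1)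
def pvRaiseWitnessOut_get_small_patterns : List (Int × Int) := [(2, 1), (1, 1)]

def Spec_get_small_patterns (patterns : List Int) (mask_size : Int) (out : List (Int × Int)) : Prop := out = get_small_patterns_alt patterns mask_size
instance (patterns : List Int) (mask_size : Int) (out : List (Int × Int)) : Decidable (Spec_get_small_patterns patterns mask_size out) := by unfold Spec_get_small_patterns; infer_instance

-- ===== CLAIM (what is proved, stated in full; the proofs are below) =====
def Claim_equal_get_small_patterns : Prop := ∀ (patterns : List Int) (mask_size : Int), Dom_get_small_patterns patterns mask_size → Pre_get_small_patterns patterns mask_size → Spec_get_small_patterns patterns mask_size (get_small_patterns patterns mask_size)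

def Claim_raises_get_small_patterns : Prop := (∀ (patterns : List Int) (mask_size : Int), Dom_get_small_patterns patterns mask_size → Raises_get_small_patterns patterns mask_size → ¬ Pre_get_small_patterns patterns mask_size) ∧ (Dom_get_small_patterns (pvRaiseWitness_get_small_patterns.1) (pvRaiseWitness_get_small_patterns.2) ∧ Raises_get_small_patterns (pvRaiseWitness_get_small_patterns.1) (pvRaiseWitness_get_small_patterns.2) ∧ get_small_patterns_alt (pvRaiseWitness_get_small_patterns.1) (pvRaiseWitness_get_small_patterns.2) = pvRaiseWitnessOut_get_small_patterns)

-- ===== LEMMAS AND PROOFS =====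

-- reference digit expansion (least-significant first), used only by the proofs
def pvDigits3 (n : Nat) : List Int :=
  if h : n = 0 then [] else ((n % 3 : Nat) : Int) :: pvDigits3 (n / 3)
decreasing_by exact Nat.div_lt_self (Nat.pos_of_ne_zero h) (by omega)

lemma pvDigitsB_acc (f : Nat) : ∀ (p : Int) (a b : List Int),
    pvDigitsB f p (a ++ b) = a ++ pvDigitsB f p b := by
  induction f with
  | zero => intro p a b; simp [pvDigitsB]
  | succ f ih =>
    intro p a b
    by_cases hp : p = 0
    · simp [pvDigitsB, hp]
    · simp only [pvDigitsB, if_pos hp, ne_eq]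
      rw [List.append_assoc, ih]


lemma pvDigitsB_eq (f : Nat) : ∀ (p : Int), 0 ≤ p → p.toNat ≤ f →
    pvDigitsB f p [] = pvDigits3 p.toNat := by
  induction f with
  | zero =>
    intro p h0 hf
    have : p = 0 := by omega
    subst this
    simp [pvDigitsB, pvDigits3]
  | succ f ih =>
    intro p h0 hf
    by_cases hp : p = 0
    · subst hp; simp [pvDigitsB, pvDigits3]
    · have hpos : 0 < p := by omega
      have hd : PySem.Int.floordiv p 3 = ((p.toNat / 3 : Nat) : Int) := by
        rw [PySem.Int.floordiv_eq_ediv_of_pos (by norm_num)]; omega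
      have hm : PySem.Int.mod p 3 = ((p.toNat % 3 : Nat) : Int) := by
        rw [PySem.Int.mod_eq_emod_of_pos (by norm_num)]; omega
      have hlt : p.toNat / 3 < p.toNat := Nat.div_lt_self (by omega) (by omega)
      rw [pvDigitsB, if_pos hp, hd, hm]
      have := pvDigitsB_acc f ((p.toNat / 3 : Nat) : Int) [((p.toNat % 3 : Nat) : Int)] []
      simp only [List.append_nil] at this
      simp only [List.nil_append]
      rw [this, ih _ (by positivity) (by omega)]
      conv_rhs => rw [pvDigits3]
      simp [show p.toNat ≠ 0 by omega]
      congr 1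
      omega


lemma pvHornerB_cons (d : Int) (t : List Int) : pvHornerB (d :: t) = 3 * pvHornerB t + d := by
  simp [pvHornerB, List.foldl_append]
  ring


lemma pvModPow (n m : Nat) : n % 3^(m+1) = 3 * (n/3 % 3^m) + n % 3 := by
  have h1 : n % 3 < 3 := Nat.mod_lt _ (by omega)
  have h2 : n / 3 % 3 ^ m < 3 ^ m := Nat.mod_lt _ (by positivity)
  have h3 : (1:Nat) ≤ 3 ^ m := Nat.one_le_pow _ _ (by omega)
  conv_lhs => rw [← Nat.div_add_mod n 3]
  rw [pow_succ', Nat.add_mod, Nat.mul_mod_mul_left,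
      Nat.mod_eq_of_lt (a := n % 3) (by nlinarith),
      Nat.mod_eq_of_lt (by nlinarith)]


lemma pvHornerB_take : ∀ (n m : Nat),
    pvHornerB (List.take m (pvDigits3 n)) = ((n % 3 ^ m : Nat) : Int) := by
  intro n
  induction n using Nat.strong_induction_on with
  | _ n ih =>
    intro m
    by_cases hn : n = 0
    · subst hn; simp [pvDigits3, pvHornerB]
    · rw [pvDigits3, dif_neg hn]
      cases m with
      | zero => simp [pvHornerB]
      | succ m =>
        rw [List.take_succ_cons, pvHornerB_cons,
            ih (n / 3) (Nat.div_lt_self (by omega) (by omega)) m, pvModPow]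
        push_cast; ring


lemma pvSlice_shift (x : Int) (xs : List Int) (k : Nat) (m : Int) (hm : 0 ≤ m) :
    PySem.List.slice (x :: xs) (some ((k:Int)+1)) (some ((k:Int)+1+m))
      = PySem.List.slice xs (some (k:Int)) (some ((k:Int)+m)) := by
  rw [PySem.List.slice_toNat _ (by omega) (by omega), PySem.List.slice_toNat _ (by omega) (by omega)]
  have h1 : ((k:Int)+1).toNat = k+1 := by omega
  have h2 : ((k:Int)+1+m).toNat = k+1+m.toNat := by omega
  have h3 : ((k:Int)+m).toNat = k + m.toNat := by omega
  have h4 : (k:Int).toNat = k := by omega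
  rw [h1, h2, h3, h4, List.drop_succ_cons]
  congr 1
  omega


lemma pvWindowsB_cons (x : Int) (xs : List Int) (m : Int) (hm : 0 ≤ m)
    (d : PySem.Dict Int Int) :
    pvWindowsB (x :: xs) m d =
      pvWindowsB xs m
        (let w := pvHornerB (List.take m.toNat (x :: xs));
         if w ≠ 0 then d.insert w (d.getD w 0 + 1) else d) := by
  unfold pvWindowsB
  rw [PySem.List.pyRange_one, PySem.List.pyRange_one]
  have hl1 : (((x::xs).length : Int) - 0).toNat = xs.length + 1 := by simp
  have hl2 : ((xs.length : Int) - 0).toNat = xs.length := by simp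
  rw [hl1, hl2, List.range_succ_eq_map, List.foldl_map, List.foldl_map, List.foldl_cons,
      List.foldl_map]
  simp only [Nat.cast_zero, zero_add]
  congr 1
  · funext acc k
    push_cast
    rw [pvSlice_shift _ _ _ _ hm]
  · rw [PySem.List.slice_zero_start, PySem.List.slice_to _ hm]


lemma pvUpd_eq (d : PySem.Dict Int Int) (sp : Int) :
    d.insert sp (if d.contains sp = false then 1 else d.getD sp 0 + 1)
      = d.insert sp (d.getD sp 0 + 1) := by
  by_cases h : d.contains sp
  · simp [h]
  · have h0 : d.getD sp 0 = 0 := by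
      apply PySem.Dict.getD_of_not_contains
      simpa using h
    simp [h, h0]


lemma pvMod3pow (p : Int) (hp : 0 ≤ p) (m : Nat) :
    PySem.Int.mod p ((3:Int)^m) = ((p.toNat % 3^m : Nat) : Int) := by
  rw [PySem.Int.mod_eq_emod_of_pos (by positivity)]
  have hcast : p = (p.toNat : Int) := by omega
  rw [hcast]
  push_cast
  simp


lemma pvPerPattern (m : Int) (hm : 0 ≤ m) : ∀ (f : Nat) (p psize : Int) (d : PySem.Dict Int Int),
    0 ≤ p → p.toNat ≤ f →
    pvInnerA m f p psize d = pvWindowsB (pvDigits3 p.toNat) m d := by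
  intro f
  induction f with
  | zero =>
    intro p psize d h0 hf
    have : p = 0 := by omega
    subst this
    simp [pvInnerA, pvDigits3, pvWindowsB, PySem.List.pyRange_one_eq_nil]
  | succ f ih =>
    intro p psize d h0 hf
    by_cases hp : p = 0
    · subst hp
      simp [pvInnerA, pvDigits3, pvWindowsB, PySem.List.pyRange_one_eq_nil]
    · have hpos : 0 < p := by omega
      rw [pvInnerA, if_pos hp]
      simp only []
      rw [pvUpd_eq]
      have hd : PySem.Int.floordiv p 3 = ((p.toNat / 3 : Nat) : Int) := by
        rw [PySem.Int.floordiv_eq_ediv_of_pos (by norm_num)]; omega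
      rw [hd, ih _ (psize - 1) _ (by positivity) (by simp; omega)]
      have hD : pvDigits3 p.toNat = ((p.toNat % 3 : Nat) : Int) :: pvDigits3 (p.toNat / 3) := by
        rw [pvDigits3, dif_neg (show p.toNat ≠ 0 by omega)]
      conv_rhs => rw [hD]
      rw [pvWindowsB_cons _ _ _ hm]
      simp only [Int.toNat_natCast]
      rw [← hD, pvHornerB_take, pvMod3pow p h0 m.toNat]


lemma pvPS_len : PATTERN_SIZES.length = 112 := by decide


lemma pvOuter (m : Int) : ∀ (ps : List Int) (s : Nat) (d : PySem.Dict Int Int),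
    (∀ p ∈ ps, 0 ≤ p) → s + ps.length ≤ 112 → (0 ≤ m ∨ ∀ p ∈ ps, p = 0) →
    (PySem.List.enumerate ps (s : Int)).foldl (fun d pi =>
      match PySem.List.pyGet? PATTERN_SIZES pi.1 with
      | none => d
      | some psize => pvInnerA m pi.2.toNat pi.2 psize d) d
    = ps.foldl (fun d pattern => pvWindowsB (pvDigitsB pattern.toNat pattern []) m d) d := by
  intro ps
  induction ps with
  | nil => intro s d _ _ _; simp [PySem.List.enumerate_nil]
  | cons p ps ih =>
    intro s d hnn hlen hm'
    rw [PySem.List.enumerate_cons, List.foldl_cons, List.foldl_cons]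
    have hget : PySem.List.pyGet? PATTERN_SIZES (s : Int) = some (PATTERN_SIZES[s]'(by have := pvPS_len; simp at hlen; omega)) := by
      rw [PySem.List.pyGet?_natCast]
      exact List.getElem?_eq_getElem _
    have hp : 0 ≤ p := hnn p (by simp)
    have hstep : ∀ psize d₀, pvInnerA m p.toNat p psize d₀
        = pvWindowsB (pvDigitsB p.toNat p []) m d₀ := by
      intro psize d₀
      rcases hm' with hm | hz
      · rw [pvDigitsB_eq _ p hp le_rfl, pvPerPattern m hm p.toNat p psize d₀ hp le_rfl]
      · have : p = 0 := hz p (by simp)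
        subst this
        simp [pvInnerA, pvDigitsB, pvWindowsB, PySem.List.pyRange_one_eq_nil]
    simp only [hget, hstep]
    have hcast : (s : Int) + 1 = ((s + 1 : Nat) : Int) := by push_cast; ring
    rw [hcast, ih (s+1) _ (fun q hq => hnn q (by simp [hq])) (by simp at hlen ⊢; omega)
        (hm'.imp id (fun h q hq => h q (by simp [hq])))]


-- ===== VERDICT (by name: the statement is the Claim_ definition above) =====
theorem get_small_patterns_spec : Claim_equal_get_small_patterns := by
  intro patterns mask_size _hDom hPre
  obtain ⟨hnn, hlen, hm⟩ := hPre
  unfold Spec_get_small_patterns get_small_patterns get_small_patterns_alt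
  have := pvOuter mask_size patterns 0 PySem.Dict.empty hnn (by simpa using hlen) hm
  simpa using congrArg PySem.Dict.items this

@[simp]
theorem get_small_patterns_raises : Claim_raises_get_small_patterns := by
  unfold Claim_raises_get_small_patterns
  constructor
  · intro patterns mask_size _ hR hPre
    obtain ⟨hnn, hor⟩ := hR
    obtain ⟨pnn, plen, pm⟩ := hPre
    rcases hor with hlen | ⟨hm, p, hp, hne⟩
    · omega
    · rcases pm with h0 | hz
      · omega
      · exact hne (hz p hp)
  · exact ⟨by decide, by decide, by decide⟩
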